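-- pv_equiv track=rewrite | github.com/CodingTest-lab/note_behindy | 프로그래머스/2/340211. ［PCCP 기출문제］ 3번 ／ 충돌위험 찾기/［PCCP 기출문제］ 3번 ／ 충돌위험 찾기.py | crash_check
-- ===== SOURCE A (Python) =====
-- def crash_check(path, t):
--     positions = {}  # 각 위치별 로봇 수를 기록할 딕셔너리
--     crash_count = 0
--
--     # 각 로봇의 t시점 위치 확인
--     for robot_idx in range(len(path)):
--         # 해당 로봇이 아직 이동 중인 경우만 체크
--         if t < len(path[robot_idx]):
--             current_pos = tuple(path[robot_idx][t])
--
--             if current_pos in positions: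
--                 if positions[current_pos] == 1:
--                     crash_count += 1
--                 positions[current_pos] += 1
--             else:
--                 positions[current_pos] = 1
--
--     return crash_count
-- ===== SOURCE B (Python) =====
-- def crash_check(path, t):
--     # No dictionary at all: materialise the occupied positions at time t,
--     # then consume that list front to back with plain membership scans,
--     # counting each first occurrence that recurs later in the remainder.
--     occ = [tuple(p[t]) for p in path if t < len(p)]
--     crashes = 0
--     seen = []
--     rest = occ
--     while rest:
--         head, rest = rest[0], rest[1:]
--         if head not in seen and head in rest:
--             crashes += 1
--         seen.append(head)
--     return crashes
-- ===== Notes on version B (the rewrite author's own statement) =====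
-- stated objective: alternative
-- what changed: B drops A's hash table and inline crash counter entirely: it first materialises the list of occupied positions at time t, then consumes it with a seen/rest split using brute-force list membership scans, counting a crash at each first occurrence of a position that recurs in the remainder.
import Mathlib
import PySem

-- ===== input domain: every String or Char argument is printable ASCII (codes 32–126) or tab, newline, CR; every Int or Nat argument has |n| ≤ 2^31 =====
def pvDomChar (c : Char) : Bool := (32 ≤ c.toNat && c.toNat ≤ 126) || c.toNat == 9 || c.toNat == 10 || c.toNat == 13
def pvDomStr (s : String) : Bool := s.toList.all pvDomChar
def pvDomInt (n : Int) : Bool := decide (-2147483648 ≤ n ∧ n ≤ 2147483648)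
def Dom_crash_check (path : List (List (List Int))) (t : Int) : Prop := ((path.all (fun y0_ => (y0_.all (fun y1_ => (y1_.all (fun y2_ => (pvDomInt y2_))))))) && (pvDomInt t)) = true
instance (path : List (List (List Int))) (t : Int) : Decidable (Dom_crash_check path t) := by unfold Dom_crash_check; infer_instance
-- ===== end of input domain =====

-- B drops A's dict and inline crash counter: it lists the occupied positions, then
-- consumes that list with a seen/rest split and plain membership scans; same result, no hash table.

-- ===== PORT A =====
def crash_check (path : List (List (List Int))) (t : Int) : Int :=
  let st := path.foldl (fun (st : PySem.Dict (List Int) Int × Int) robot =>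
    if t < (robot.length : Int) then
      match PySem.List.pyGet? robot t with
      | some pos =>
        if st.1.contains pos then
          (st.1.insert pos (st.1.getD pos 0 + 1),
           if st.1.getD pos 0 = 1 then st.2 + 1 else st.2)
        else (st.1.insert pos 1, st.2)
      | none => st        -- Python raises IndexError here; excluded by Pre_
    else st) (PySem.Dict.empty, 0)
  st.2

-- ===== PORT B =====
-- the while loop of Source B: head, rest = rest[0], rest[1:]; test the two memberships; append to seen
def pvScan (seen : List (List Int)) (rest : List (List Int)) (crashes : Int) : Int :=
  match rest with
  | [] => crashes
  | head :: rest' =>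
      pvScan (seen ++ [head]) rest'
        (if head ∉ seen ∧ head ∈ rest' then crashes + 1 else crashes)

def crash_check_alt (path : List (List (List Int))) (t : Int) : Int :=
  let occ := path.filterMap (fun p =>
    if t < (p.length : Int) then PySem.List.pyGet? p t else none)
    -- the comprehension [tuple(p[t]) for p in path if t < len(p)]; pyGet? = none is an
    -- IndexError in Python, excluded by Pre_
  pvScan [] occ 0

-- ===== PRECONDITION & SPEC =====
-- Pre_ excludes exactly the inputs where Python's path[i][t] raises IndexError
-- (a robot path with t < len(path[i]) but t below -len(path[i])); both A and B raise there.
def Pre_crash_check (path : List (List (List Int))) (t : Int) : Prop :=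
  ∀ robot ∈ path, t < (robot.length : Int) → -(robot.length : Int) ≤ t
instance (path : List (List (List Int))) (t : Int) : Decidable (Pre_crash_check path t) := by unfold Pre_crash_check; infer_instance
def pvWitness_crash_check : List (List (List Int)) × Int := ([[[0, 0], [1, 1]], [[1, 1], [0, 0]], [[0, 0]]], 0)

def Spec_crash_check (path : List (List (List Int))) (t : Int) (out : Int) : Prop := out = crash_check_alt path t
instance (path : List (List (List Int))) (t : Int) (out : Int) : Decidable (Spec_crash_check path t out) := by unfold Spec_crash_check; infer_instance

-- ===== CLAIM (what is proved, stated in full; the proofs are below) =====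
def Claim_equal_crash_check : Prop := ∀ (path : List (List (List Int))) (t : Int), Dom_crash_check path t → Pre_crash_check path t → Spec_crash_check path t (crash_check path t)

-- ===== LEMMAS AND PROOFS =====

-- the position of robot `p` at time t, if it is still moving (none = skipped or IndexError)
def pvPosAt (t : Int) (p : List (List Int)) : Option (List Int) :=
  if t < (p.length : Int) then PySem.List.pyGet? p t else none

-- number of distinct positions occupied at least twice in l
def pvCnt2 (l : List (List Int)) : Int :=
  (((PySem.Set.ofList l).filter (fun k => 2 ≤ l.count k)).length : Int)

theorem pvCnt2_append_singleton (l : List (List Int)) (x : List Int) :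
    pvCnt2 (l ++ [x]) = pvCnt2 l + (if l.count x = 1 then 1 else 0) := by
  unfold pvCnt2
  rw [PySem.Set.ofList_append_singleton]
  have hcnt : ∀ k : List Int, (l ++ [x]).count k = l.count k + (if k = x then 1 else 0) := by
    intro k; rw [List.count_append]
    by_cases h : k = x
    · simp [h]
    · simp [h, List.count_eq_zero]
  by_cases hx : x ∈ l
  · have hadd : PySem.Set.add (PySem.Set.ofList l) x = PySem.Set.ofList l := by
      simp [PySem.Set.add, PySem.Set.contains, hx]
    rw [hadd, ← List.countP_eq_length_filter, ← List.countP_eq_length_filter]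
    have hmem : x ∈ PySem.Set.ofList l := by simpa using hx
    have hnd : (PySem.Set.ofList l).Nodup := PySem.Set.nodup_ofList l
    have hperm := List.perm_cons_erase hmem
    rw [hperm.countP_eq, hperm.countP_eq, List.countP_cons, List.countP_cons]
    have htail : List.countP (fun k => decide (2 ≤ (l ++ [x]).count k)) ((PySem.Set.ofList l).erase x)
        = List.countP (fun k => decide (2 ≤ l.count k)) ((PySem.Set.ofList l).erase x) := by
      apply List.countP_congr
      intro k hk
      have hkx : k ≠ x := (hnd.mem_erase_iff.mp hk).1
      simp [hcnt k, hkx]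
    rw [htail]
    have h1 : 1 ≤ l.count x := List.count_pos_iff.mpr hx
    simp only [hcnt x, decide_eq_true_eq]
    split_ifs <;> push_cast <;> omega
  · have hadd : PySem.Set.add (PySem.Set.ofList l) x = PySem.Set.ofList l ++ [x] := by
      simp [PySem.Set.add, PySem.Set.contains, hx]
    rw [hadd, List.filter_append]
    have h0 : l.count x = 0 := List.count_eq_zero.mpr hx
    have hxf : List.filter (fun k => decide (2 ≤ (l ++ [x]).count k)) [x] = [] := by
      simp [h0]
    have hcong : List.filter (fun k => decide (2 ≤ (l ++ [x]).count k)) (PySem.Set.ofList l)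
        = List.filter (fun k => decide (2 ≤ l.count k)) (PySem.Set.ofList l) := by
      apply List.filter_congr
      intro k hk
      have hkx : k ≠ x := fun h => hx (h ▸ (by simpa using hk))
      simp [hcnt k, hkx]
    rw [hxf, hcong]
    simp [h0]

-- one step of A's loop, from the state that corresponds to an already-processed prefix `pre`
theorem pvA_step (pre : List (List Int)) (x : List Int) :
    (if (PySem.Dict.counter pre).contains x then
      ((PySem.Dict.counter pre).insert x ((PySem.Dict.counter pre).getD x 0 + 1),
       if (PySem.Dict.counter pre).getD x 0 = 1 then pvCnt2 pre + 1 else pvCnt2 pre)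
     else ((PySem.Dict.counter pre).insert x 1, pvCnt2 pre))
    = (PySem.Dict.counter (pre ++ [x]), pvCnt2 (pre ++ [x])) := by
  have hmod : PySem.Dict.counter (pre ++ [x])
      = (PySem.Dict.counter pre).insert x ((PySem.Dict.counter pre).getD x 0 + 1) := by
    rw [PySem.Dict.counter_append_singleton]; rfl
  rw [PySem.Dict.contains_counter, PySem.Dict.getD_counter, pvCnt2_append_singleton, hmod,
    PySem.Dict.getD_counter]
  by_cases hx : x ∈ pre
  · rw [if_pos (by simpa using hx)]
    by_cases h1 : pre.count x = 1
    · simp [h1]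
    · rw [if_neg (by exact_mod_cast fun h => h1 (by exact_mod_cast h)), if_neg h1, add_zero]
  · have h0 : pre.count x = 0 := List.count_eq_zero.mpr hx
    rw [if_neg (by simpa using hx)]
    simp [h0]

-- A's loop over the occupied positions keeps (frequency table of the prefix, its ≥2-count)
theorem pvA_loop (occ : List (List Int)) : ∀ pre : List (List Int),
    (occ.foldl (fun (st : PySem.Dict (List Int) Int × Int) pos =>
      if st.1.contains pos then
        (st.1.insert pos (st.1.getD pos 0 + 1),
         if st.1.getD pos 0 = 1 then st.2 + 1 else st.2)
      else (st.1.insert pos 1, st.2)) (PySem.Dict.counter pre, pvCnt2 pre))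
    = (PySem.Dict.counter (pre ++ occ), pvCnt2 (pre ++ occ)) := by
  induction occ with
  | nil => intro pre; simp
  | cons x occ ih =>
    intro pre
    rw [List.foldl_cons]
    have hstep := pvA_step pre x
    simp only at hstep ⊢
    rw [hstep, ih (pre ++ [x]), List.append_assoc]
    rfl

-- number of distinct positions in `rest`, not yet seen, occurring at least twice in rest
def pvCnt2F (seen rest : List (List Int)) : Int :=
  ((rest.toFinset.filter (fun k => k ∉ seen ∧ 2 ≤ rest.count k)).card : Int)

theorem pvCnt2F_cons (seen : List (List Int)) (head : List Int) (rest : List (List Int)) :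
    pvCnt2F seen (head :: rest)
      = (if head ∉ seen ∧ head ∈ rest then 1 else 0) + pvCnt2F (seen ++ [head]) rest := by
  classical
  unfold pvCnt2F
  have hcnt : ∀ k : List Int, k ≠ head → (head :: rest).count k = rest.count k := by
    intro k hk
    rw [List.count_cons]
    simp [Ne.symm hk]
  have hqp : rest.toFinset.filter (fun k => k ∉ seen ++ [head] ∧ 2 ≤ rest.count k)
      = (rest.toFinset.erase head).filter (fun k => k ∉ seen ∧ 2 ≤ (head :: rest).count k) := by
    ext k
    simp only [Finset.mem_filter, Finset.mem_erase, List.mem_append, List.mem_singleton]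
    constructor
    · rintro ⟨hk, hns, hc⟩
      push_neg at hns
      exact ⟨⟨hns.2, hk⟩, hns.1, by rw [hcnt k hns.2]; exact hc⟩
    · rintro ⟨⟨hkh, hk⟩, hns, hc⟩
      exact ⟨hk, by push_neg; exact ⟨hns, hkh⟩, by rw [← hcnt k hkh]; exact hc⟩
  rw [List.toFinset_cons]
  by_cases hs : head ∉ seen ∧ head ∈ rest
  · have hph : head ∉ seen ∧ 2 ≤ (head :: rest).count head := by
      refine ⟨hs.1, ?_⟩
      have h := List.count_pos_iff.mpr hs.2
      rw [List.count_cons_self]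
      omega
    have hhe : head ∉ (rest.toFinset.erase head).filter
        (fun k => k ∉ seen ∧ 2 ≤ (head :: rest).count k) := by
      simp
    have hsplit : rest.toFinset.filter (fun k => k ∉ seen ∧ 2 ≤ (head :: rest).count k)
        = insert head ((rest.toFinset.erase head).filter
            (fun k => k ∉ seen ∧ 2 ≤ (head :: rest).count k)) := by
      ext k
      by_cases hk : k = head
      · subst hk
        simp [Finset.mem_filter, List.mem_toFinset, hs.2, hph]
      · simp [Finset.mem_filter, Finset.mem_insert, Finset.mem_erase, hk]
    have hins : insert head rest.toFinset = rest.toFinset :=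
      Finset.insert_eq_self.mpr (List.mem_toFinset.mpr hs.2)
    rw [hins, if_pos hs, hqp, hsplit, Finset.card_insert_of_notMem hhe]
    push_cast; ring
  · rw [if_neg hs, hqp]
    have hph : ¬ (head ∉ seen ∧ 2 ≤ (head :: rest).count head) := by
      intro ⟨h1, h2⟩
      apply hs
      refine ⟨h1, ?_⟩
      by_contra hm
      have h0 : rest.count head = 0 := List.count_eq_zero.mpr hm
      rw [List.count_cons_self] at h2
      omega
    rw [Finset.filter_insert, if_neg hph]
    have herase : (rest.toFinset.erase head).filter (fun k => k ∉ seen ∧ 2 ≤ (head :: rest).count k)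
        = rest.toFinset.filter (fun k => k ∉ seen ∧ 2 ≤ (head :: rest).count k) := by
      ext k
      by_cases hk : k = head
      · subst hk
        simp only [Finset.mem_filter, Finset.mem_erase, List.mem_toFinset]
        constructor
        · rintro ⟨⟨hkh, _⟩, _⟩; exact absurd rfl hkh
        · rintro ⟨_, hp⟩; exact absurd hp hph
      · simp [Finset.mem_filter, Finset.mem_erase, hk]
    rw [herase]; ring

theorem pvScan_eq (rest : List (List Int)) : ∀ (seen : List (List Int)) (crashes : Int),
    pvScan seen rest crashes = crashes + pvCnt2F seen rest := by
  induction rest with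
  | nil => intro seen crashes; simp [pvScan, pvCnt2F]
  | cons head rest ih =>
    intro seen crashes
    rw [pvScan, ih, pvCnt2F_cons]
    split_ifs <;> ring

-- the ≥2-count over the PySem set of first occurrences equals the Finset-based count
theorem pvCnt2_eq_F (l : List (List Int)) : pvCnt2 l = pvCnt2F [] l := by
  classical
  unfold pvCnt2 pvCnt2F
  have hnd : (PySem.Set.ofList l).Nodup := PySem.Set.nodup_ofList l
  have hfil : ((PySem.Set.ofList l).filter (fun k => 2 ≤ l.count k)).Nodup :=
    hnd.filter _
  rw [← List.toFinset_card_of_nodup hfil, List.toFinset_filter]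
  have hts : (PySem.Set.ofList l).toFinset = l.toFinset := by
    ext k; simp
  rw [hts]
  congr 2
  ext k
  simp

-- both loops, reduced to the list of occupied positions, agree
theorem pvAB (path : List (List (List Int))) (t : Int) :
    crash_check path t = crash_check_alt path t := by
  unfold crash_check crash_check_alt
  have hA : path.foldl (fun (st : PySem.Dict (List Int) Int × Int) robot =>
      if t < (robot.length : Int) then
        match PySem.List.pyGet? robot t with
        | some pos =>
          if st.1.contains pos then
            (st.1.insert pos (st.1.getD pos 0 + 1),
             if st.1.getD pos 0 = 1 then st.2 + 1 else st.2)
          else (st.1.insert pos 1, st.2)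
        | none => st
      else st) (PySem.Dict.empty, 0)
      = (path.filterMap (pvPosAt t)).foldl (fun (st : PySem.Dict (List Int) Int × Int) pos =>
          if st.1.contains pos then
            (st.1.insert pos (st.1.getD pos 0 + 1),
             if st.1.getD pos 0 = 1 then st.2 + 1 else st.2)
          else (st.1.insert pos 1, st.2)) (PySem.Dict.empty, 0) := by
    rw [List.foldl_filterMap]
    have hf : (fun (st : PySem.Dict (List Int) Int × Int) robot =>
        if t < (robot.length : Int) then
          match PySem.List.pyGet? robot t with
          | some pos =>
            if st.1.contains pos then
              (st.1.insert pos (st.1.getD pos 0 + 1),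
               if st.1.getD pos 0 = 1 then st.2 + 1 else st.2)
            else (st.1.insert pos 1, st.2)
          | none => st
        else st)
        = (fun (st : PySem.Dict (List Int) Int × Int) robot =>
            match pvPosAt t robot with
            | some pos =>
              if st.1.contains pos then
                (st.1.insert pos (st.1.getD pos 0 + 1),
                 if st.1.getD pos 0 = 1 then st.2 + 1 else st.2)
              else (st.1.insert pos 1, st.2)
            | none => st) := by
      funext st robot
      unfold pvPosAt
      by_cases h : t < (robot.length : Int) <;> simp [h]
    rw [hf]
    congr 1
    funext x y
    cases pvPosAt t y <;> rfl
  have hocc : path.filterMap (fun p =>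
      if t < (p.length : Int) then PySem.List.pyGet? p t else none)
      = path.filterMap (pvPosAt t) := rfl
  simp only [hA, hocc]
  rw [pvScan_eq, ← pvCnt2_eq_F]
  rw [show (PySem.Dict.empty, (0:Int)) = ((PySem.Dict.counter ([] : List (List Int))), pvCnt2 []) from rfl]
  rw [pvA_loop]
  simp

-- ===== VERDICT (by name: the statement is the Claim_ definition above) =====
theorem crash_check_spec : Claim_equal_crash_check := by
  intro path t _ _
  unfold Spec_crash_check
  exact pvAB path t
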